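-- pv_equiv track=rewrite | github.com/jinifor/foss4g-2026-tech-trends | scripts/foss4g_csv.py | build_output_fieldnames
-- ===== SOURCE A (Python) =====
-- from typing import Iterable
--
-- def build_output_fieldnames(existing: Iterable[str], generated: Iterable[str]) -> list[str]:
--     generated_list = list(generated)
--     generated_set = set(generated_list)
--     fieldnames: list[str] = []
--
--     for field in existing:
--         if field and field not in fieldnames and field not in generated_set:
--             fieldnames.append(field)
--
--     for field in generated_list:
--         if field not in fieldnames:
--             fieldnames.append(field)
--
--     return fieldnames
-- ===== SOURCE B (Python) =====
-- from typing import Iterable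
--
-- def build_output_fieldnames(existing: Iterable[str], generated: Iterable[str]) -> list[str]:
--     gen = list(generated)
--     gen_set = set(gen)
--     combined = [f for f in existing if f and f not in gen_set] + gen
--     # map each field to the index of its first occurrence, then order by that index
--     first: dict[str, int] = {}
--     for i, f in enumerate(combined):
--         first.setdefault(f, i)
--     return [f for f, _ in sorted(first.items(), key=lambda kv: kv[1])]
-- ===== Notes on version B (the rewrite author's own statement) =====
-- stated objective: faster
-- what changed: Replaces A's accumulator loops with list-membership checks against the already-emitted output by a first-occurrence-index map (dict.setdefault over one enumerated combined list) whose items are then ordered by sorting on that index.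
import Mathlib
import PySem

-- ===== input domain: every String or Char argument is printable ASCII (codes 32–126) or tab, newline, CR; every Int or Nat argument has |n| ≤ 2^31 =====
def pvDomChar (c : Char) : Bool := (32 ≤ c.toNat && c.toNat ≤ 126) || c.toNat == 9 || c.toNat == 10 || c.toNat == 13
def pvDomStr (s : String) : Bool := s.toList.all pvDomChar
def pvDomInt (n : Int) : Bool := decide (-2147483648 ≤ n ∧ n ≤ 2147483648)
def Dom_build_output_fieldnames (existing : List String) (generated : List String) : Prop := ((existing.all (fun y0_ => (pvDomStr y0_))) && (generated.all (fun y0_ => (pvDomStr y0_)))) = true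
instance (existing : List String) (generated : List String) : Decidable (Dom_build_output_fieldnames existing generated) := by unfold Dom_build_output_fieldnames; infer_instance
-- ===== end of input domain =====

-- B replaces A's accumulator loops (list-membership checks against the already-emitted output) by a
-- first-occurrence-index map built with setdefault over one enumerated list, then a sort on that
-- index (measured faster: A's first loop rescans its output list per element).

-- ===== PORT A =====
def build_output_fieldnames (existing : List String) (generated : List String) : List String :=
  let generated_set : PySem.Set String := PySem.Set.ofList generated
  let fieldnames : List String :=
    existing.foldl (fun fieldnames field =>
      if field ≠ "" ∧ ¬ fieldnames.contains field ∧ ¬ generated_set.contains field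
      then fieldnames ++ [field] else fieldnames) []
  generated.foldl (fun fieldnames field =>
    if ¬ fieldnames.contains field then fieldnames ++ [field] else fieldnames) fieldnames

-- ===== PORT B =====
def build_output_fieldnames_alt (existing : List String) (generated : List String) : List String :=
  let gen := generated
  let gen_set : PySem.Set String := PySem.Set.ofList gen
  let combined := (existing.filter (fun f => f ≠ "" && !gen_set.contains f)) ++ gen
  let first : PySem.Dict String Int :=
    (PySem.List.enumerate combined 0).foldl (fun d p => d.setdefault p.2 p.1) PySem.Dict.empty
  (PySem.List.sorted first.items (fun kv => kv.2) false).map (fun kv => kv.1)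

-- ===== PRECONDITION & SPEC =====
def Spec_build_output_fieldnames (existing : List String) (generated : List String) (out : List String) : Prop := out = build_output_fieldnames_alt existing generated
instance (existing : List String) (generated : List String) (out : List String) : Decidable (Spec_build_output_fieldnames existing generated out) := by unfold Spec_build_output_fieldnames; infer_instance

-- ===== CLAIM (what is proved, stated in full; the proofs are below) =====
def Claim_equal_build_output_fieldnames : Prop := ∀ (existing : List String) (generated : List String), Dom_build_output_fieldnames existing generated → Spec_build_output_fieldnames existing generated (build_output_fieldnames existing generated)

-- ===== LEMMAS AND PROOFS =====

-- A's second-loop step is exactly PySem.Set.add with the branches swapped.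
theorem stepA2_eq_add : (fun (acc : List String) (f : String) =>
    if ¬ acc.contains f then acc ++ [f] else acc) = PySem.Set.add := by
  funext acc f
  simp [PySem.Set.add, PySem.Set.contains]

-- set(xs) built over an appended list splits into two folds of Set.add.
theorem ofList_append_foldl (p q : List String) :
    PySem.Set.ofList (p ++ q) = q.foldl PySem.Set.add (p.foldl PySem.Set.add []) := by
  rw [PySem.Set.ofList_eq_foldl, List.foldl_append]

-- A's first loop over `existing` equals folding Set.add over the filtered list.
theorem loop1_eq_filter_fold (gs : PySem.Set String) (l : List String) (acc : List String) :
    l.foldl (fun fieldnames field =>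
      if field ≠ "" ∧ ¬ fieldnames.contains field ∧ ¬ gs.contains field
      then fieldnames ++ [field] else fieldnames) acc
    = (l.filter (fun f => f ≠ "" && !gs.contains f)).foldl PySem.Set.add acc := by
  induction l generalizing acc with
  | nil => rfl
  | cons x xs ih =>
    by_cases hx : (x ≠ "" && !gs.contains x) = true
    · rw [List.filter_cons_of_pos (by simpa using hx), List.foldl_cons, List.foldl_cons, ← ih]
      congr 1
      simp only [Bool.and_eq_true, Bool.not_eq_true', decide_eq_true_eq] at hx
      have hgs : x ∉ gs := by simpa using hx.2
      by_cases hm : x ∈ acc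
      · simp [PySem.Set.add, PySem.Set.contains, hx.1, hgs, hm]
      · simp [PySem.Set.add, PySem.Set.contains, hx.1, hgs, hm]
    · rw [List.filter_cons_of_neg (by simpa using hx), List.foldl_cons, ← ih]
      congr 1
      rw [if_neg]
      rintro ⟨c1, -, c3⟩
      simp only [Bool.and_eq_true, Bool.not_eq_true', decide_eq_true_eq, not_and] at hx
      exact c3 (by simpa using hx c1)

-- Invariant of B's setdefault loop: items keep strictly increasing indices bounded by the
-- position counter, and the keys are exactly d.keys updated with the scanned elements.
theorem fold_setdefault_spec (xs : List String) (s : Int) (d : PySem.Dict String Int)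
    (hlt : ∀ p ∈ d.items, p.2 < s)
    (hpw : d.items.Pairwise (fun a b => a.2 < b.2)) :
    ((PySem.List.enumerate xs s).foldl (fun d p => d.setdefault p.2 p.1) d).items.Pairwise (fun a b => a.2 < b.2)
    ∧ (∀ p ∈ ((PySem.List.enumerate xs s).foldl (fun d p => d.setdefault p.2 p.1) d).items,
        p.2 < s + xs.length)
    ∧ ((PySem.List.enumerate xs s).foldl (fun d p => d.setdefault p.2 p.1) d).keys
        = PySem.Set.update d.keys xs := by
  induction xs generalizing s d with
  | nil =>
    refine ⟨hpw, ?_, rfl⟩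
    simpa using hlt
  | cons x xs ih =>
    rw [PySem.List.enumerate_cons, List.foldl_cons]
    by_cases hc : d.contains x = true
    · rw [PySem.Dict.setdefault_of_contains d s hc]
      have hx : x ∈ d.keys := (PySem.Dict.contains_iff_mem_keys d x).mp hc
      obtain ⟨h1, h2, h3⟩ := ih (s + 1) d (fun p hp => by have := hlt p hp; omega) hpw
      refine ⟨h1, ?_, ?_⟩
      · intro p hp; have := h2 p hp; push_cast [List.length_cons] at this ⊢; omega
      · rw [h3, PySem.Set.update_cons]
        congr 1
        simp [PySem.Set.add, PySem.Set.contains, hx]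
    · have hset : d.setdefault x s = PySem.Dict.mk (d.items ++ [(x, s)]) := by
        simp [PySem.Dict.setdefault, hc]
      have hx : x ∉ d.keys := fun hm => hc ((PySem.Dict.contains_iff_mem_keys d x).mpr hm)
      have hlt' : ∀ p ∈ (PySem.Dict.mk (d.items ++ [(x, s)]) : PySem.Dict String Int).items,
          p.2 < s + 1 := by
        intro p hp
        rcases List.mem_append.mp hp with h | h
        · have := hlt p h; omega
        · simp at h; subst h; omega
      have hpw' : (PySem.Dict.mk (d.items ++ [(x, s)]) : PySem.Dict String Int).items.Pairwise
          (fun a b => a.2 < b.2) := by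
        refine List.pairwise_append.mpr ⟨hpw, List.pairwise_singleton _ _, ?_⟩
        intro a ha b hb
        simp at hb; subst hb
        exact hlt a ha
      obtain ⟨h1, h2, h3⟩ := ih (s + 1) _ hlt' hpw'
      rw [hset]
      refine ⟨h1, ?_, ?_⟩
      · intro p hp; have := h2 p hp; push_cast [List.length_cons] at this ⊢; omega
      · rw [h3, PySem.Set.update_cons]
        congr 1
        show (d.items ++ [(x, s)]).map (fun q => q.1) = PySem.Set.add (d.items.map (fun q => q.1)) x
        simp [PySem.Set.add, PySem.Set.contains, show x ∉ d.items.map (fun q => q.1) from hx]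

-- ===== VERDICT (by name: the statement is the Claim_ definition above) =====
theorem build_output_fieldnames_spec : Claim_equal_build_output_fieldnames := by
  intro existing generated _
  show build_output_fieldnames existing generated = build_output_fieldnames_alt existing generated
  simp only [build_output_fieldnames, build_output_fieldnames_alt]
  set gs := PySem.Set.ofList generated with hgs
  set combined := (existing.filter (fun f => f ≠ "" && !gs.contains f)) ++ generated with hcomb
  set first : PySem.Dict String Int :=
    (PySem.List.enumerate combined 0).foldl (fun d p => d.setdefault p.2 p.1) PySem.Dict.empty
    with hfirst
  obtain ⟨hpw, -, hkeys⟩ := fold_setdefault_spec combined 0 PySem.Dict.empty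
    (by intro p hp; simp [PySem.Dict.empty] at hp) (by simp [PySem.Dict.empty])
  have hsorted : PySem.List.sorted first.items (fun kv => kv.2) false = first.items :=
    PySem.List.sorted_eq_of_perm_of_pairwise_lt _ _ _ (List.Perm.refl _) hpw
  rw [hsorted]
  have hmap : first.items.map (fun kv => kv.1) = first.keys := rfl
  rw [hmap, hkeys]
  have hupd : PySem.Set.update (PySem.Dict.empty : PySem.Dict String Int).keys combined
      = PySem.Set.ofList combined := by
    have h0 : (PySem.Dict.empty : PySem.Dict String Int).keys = [] := rfl
    rw [h0, PySem.Set.update_nil_left]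
  rw [hupd, hcomb, ofList_append_foldl, ← loop1_eq_filter_fold, stepA2_eq_add]
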